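-- pv_equiv track=rewrite | github.com/RohaanMooken/School | R1/Logaritmer/logaritmetull.py | logaritme
-- ===== SOURCE A (Python) =====
-- def logaritme(x):
--     svar = 0
--     for i in str(x):
--         if i == '1':
--             continue
--         else:
--             svar += 1
--
--     return svar
-- ===== SOURCE B (Python) =====
-- def logaritme(x):
--     # Count characters of str(x) other than '1' by pure arithmetic:
--     # one for the '-' sign if negative, one per decimal digit != 1.
--     svar = 1 if x < 0 else 0
--     n = -x if x < 0 else x
--     if n == 0:
--         return svar + 1
--     while n:
--         if n % 10 != 1:
--             svar += 1
--         n //= 10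
--     return svar
-- ===== Notes on version B (the rewrite author's own statement) =====
-- stated objective: alternative
-- what changed: B never builds a string: it counts the sign and the decimal digits different from 1 by repeated division/modulo on the integer itself, instead of A's per-character scan of str(x).
import Mathlib
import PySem

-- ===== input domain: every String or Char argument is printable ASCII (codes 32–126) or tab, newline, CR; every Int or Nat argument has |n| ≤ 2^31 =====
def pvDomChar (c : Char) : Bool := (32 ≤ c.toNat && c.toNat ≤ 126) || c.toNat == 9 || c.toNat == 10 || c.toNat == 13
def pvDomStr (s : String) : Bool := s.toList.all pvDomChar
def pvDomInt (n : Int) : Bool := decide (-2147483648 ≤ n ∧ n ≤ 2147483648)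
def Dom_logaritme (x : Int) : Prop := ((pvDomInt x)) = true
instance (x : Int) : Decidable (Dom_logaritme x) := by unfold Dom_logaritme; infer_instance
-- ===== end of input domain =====

-- B counts the sign and decimal digits != 1 by repeated division on the integer, never building str(x); objective: alternative.


-- ===== PORT A =====
def logaritme (x : Int) : Int :=
  (PySem.Int.toStr x).toList.foldl (fun svar i => if i == '1' then svar else svar + 1) 0

-- ===== PORT B =====
-- the while loop of Source B: divide by 10, counting digits different from 1
def logaritmeBGo (n : Nat) (svar : Int) : Int :=
  if _h : n = 0 then svar
  else logaritmeBGo (n / 10) (if n % 10 ≠ 1 then svar + 1 else svar)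
  termination_by n
  decreasing_by exact Nat.div_lt_self (Nat.pos_of_ne_zero _h) (by norm_num)

def logaritme_alt (x : Int) : Int :=
  let svar : Int := if x < 0 then 1 else 0
  let n : Nat := x.natAbs
  if n = 0 then svar + 1 else logaritmeBGo n svar

-- ===== PRECONDITION & SPEC =====
def Spec_logaritme (x : Int) (out : Int) : Prop := out = logaritme_alt x
instance (x : Int) (out : Int) : Decidable (Spec_logaritme x out) := by unfold Spec_logaritme; infer_instance

-- ===== CLAIM (what is proved, stated in full; the proofs are below) =====
def Claim_equal_logaritme : Prop := ∀ (x : Int), Dom_logaritme x → Spec_logaritme x (logaritme x)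

-- ===== LEMMAS AND PROOFS =====

-- number of decimal digits of n (the digit of 0 included) different from 1
def pvW (n : Nat) : Int :=
  (if n % 10 = 1 then 0 else 1) + (if _h : n / 10 = 0 then 0 else pvW (n / 10))
  termination_by n
  decreasing_by exact Nat.div_lt_self (by omega) (by norm_num)

theorem pv_digitChar_eq_one (d : Nat) (hd : d < 10) :
    ((Nat.digitChar d == '1') = true) ↔ d = 1 := by
  interval_cases d <;> simp [Nat.digitChar]

theorem pv_foldl_toDigitsCore (fuel : Nat) : ∀ (n : Nat) (acc : List Char) (a : Int),
    n ≤ fuel →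
    (Nat.toDigitsCore 10 (fuel + 1) n acc).foldl
        (fun svar i => if i == '1' then svar else svar + 1) a
      = acc.foldl (fun svar i => if i == '1' then svar else svar + 1) (a + pvW n) := by
  induction fuel with
  | zero =>
    intro n acc a hn
    have hn0 : n = 0 := Nat.le_zero.mp hn
    subst hn0
    simp [Nat.toDigitsCore, pvW, Nat.digitChar]
  | succ fuel ih =>
    intro n acc a hn
    have hstep : Nat.toDigitsCore 10 (fuel + 1 + 1) n acc
        = if n / 10 = 0 then (n % 10).digitChar :: acc
          else Nat.toDigitsCore 10 (fuel + 1) (n / 10) ((n % 10).digitChar :: acc) := rfl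
    rw [hstep]
    by_cases hq : n / 10 = 0
    · rw [if_pos hq]
      have hd : n % 10 < 10 := Nat.mod_lt _ (by norm_num)
      rw [List.foldl_cons, pvW, dif_pos hq]
      by_cases h1 : n % 10 = 1
      · rw [if_pos (by rw [pv_digitChar_eq_one _ hd]; exact h1)]
        simp [h1]
      · rw [if_neg (by rw [pv_digitChar_eq_one _ hd]; exact h1)]
        simp [h1]
    · rw [if_neg hq]
      have hlt : n / 10 < n := Nat.div_lt_self (by omega) (by norm_num)
      rw [ih (n / 10) _ a (by omega), List.foldl_cons]
      have hd : n % 10 < 10 := Nat.mod_lt _ (by norm_num)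
      have hw : pvW n = (if n % 10 = 1 then (0 : Int) else 1) + pvW (n / 10) := by
        rw [pvW, dif_neg hq]
      rw [hw]
      congr 1
      by_cases h1 : n % 10 = 1
      · rw [if_pos (by rw [pv_digitChar_eq_one _ hd]; exact h1)]
        simp [h1]
      · rw [if_neg (by rw [pv_digitChar_eq_one _ hd]; exact h1)]
        simp [h1]; ring

theorem pv_foldl_toDigits (n : Nat) (a : Int) :
    (Nat.toDigits 10 n).foldl (fun svar i => if i == '1' then svar else svar + 1) a
      = a + pvW n := by
  simpa [List.foldl] using pv_foldl_toDigitsCore n n [] a le_rfl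

theorem pv_bGo_eq (n : Nat) (a : Int) (hn : n ≠ 0) : logaritmeBGo n a = a + pvW n := by
  induction n using Nat.strong_induction_on generalizing a with
  | _ n ih =>
    rw [logaritmeBGo, dif_neg hn, pvW]
    by_cases hq : n / 10 = 0
    · rw [logaritmeBGo, dif_pos hq, dif_pos hq]
      by_cases h1 : n % 10 = 1 <;> simp [h1]
    · have hlt : n / 10 < n := Nat.div_lt_self (by omega) (by norm_num)
      rw [ih (n / 10) hlt _ hq, dif_neg hq]
      by_cases h1 : n % 10 = 1 <;> simp [h1]
      ring

-- ===== VERDICT (by name: the statement is the Claim_ definition above) =====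
theorem logaritme_spec : Claim_equal_logaritme := by
  intro x _
  unfold Spec_logaritme logaritme logaritme_alt
  rw [PySem.Int.toList_toStr]
  simp only [PySem.Int.toChars]
  by_cases hx : x < 0
  · have hna : x.natAbs ≠ 0 := by omega
    rw [if_pos hx, List.foldl_cons]
    rw [show (if (('-' : Char) == '1') = true then (0 : Int) else 0 + 1) = 1 from by decide]
    rw [pv_foldl_toDigits, if_neg hna, if_pos hx, pv_bGo_eq _ _ hna]
  · rw [if_neg hx, pv_foldl_toDigits]
    have hta : x.toNat = x.natAbs := by omega
    rw [hta]
    by_cases h0 : x.natAbs = 0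
    · rw [if_pos h0, h0, if_neg hx]
      rw [show pvW 0 = 1 from by rw [pvW]; norm_num]
    · rw [if_neg h0, if_neg hx, pv_bGo_eq _ _ h0]
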